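-- pv_equiv track=rewrite | github.com/SuziAI/SuziGEN | repetitions.py | get_sentence_lengths
-- ===== SOURCE A (Python) =====
-- def get_sentence_lengths(cipai):
--     sentence_lengths = []
--     counter = 0
--     pian_lengths = []
--     for idx, meter in enumerate(cipai["meter"]):
--         if meter not in ["ju", "pian"]:
--             counter += 1
--         elif meter == "ju" and idx != len(cipai["meter"]) - 1:
--             counter += 1
--             pian_lengths.append(counter)
--             counter = 0
--         else:
--             counter += 1
--             pian_lengths.append(counter)
--             counter = 0
--             sentence_lengths.append(pian_lengths)
--             pian_lengths = []
--     return sentence_lengths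
-- ===== SOURCE B (Python) =====
-- def get_sentence_lengths(cipai):
--     meter = cipai["meter"]
--     n = len(meter)
--     boundaries = [(i, m) for i, m in enumerate(meter) if m in ("ju", "pian")]
--     sentence_lengths = []
--     group = []
--     prev = -1
--     for i, m in boundaries:
--         group.append(i - prev)
--         prev = i
--         if m == "pian" or i == n - 1:
--             sentence_lengths.append(group)
--             group = []
--     return sentence_lengths
-- ===== Notes on version B (the rewrite author's own statement) =====
-- stated objective: alternative
-- what changed: Replaces A's single loop that carries a running counter and per-pian accumulator with a two-pass decomposition: first collect the ('ju'/'pian') boundary indices, then turn consecutive index differences into segment lengths, flushing a group on 'pian' or at the last index.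
import Mathlib
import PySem

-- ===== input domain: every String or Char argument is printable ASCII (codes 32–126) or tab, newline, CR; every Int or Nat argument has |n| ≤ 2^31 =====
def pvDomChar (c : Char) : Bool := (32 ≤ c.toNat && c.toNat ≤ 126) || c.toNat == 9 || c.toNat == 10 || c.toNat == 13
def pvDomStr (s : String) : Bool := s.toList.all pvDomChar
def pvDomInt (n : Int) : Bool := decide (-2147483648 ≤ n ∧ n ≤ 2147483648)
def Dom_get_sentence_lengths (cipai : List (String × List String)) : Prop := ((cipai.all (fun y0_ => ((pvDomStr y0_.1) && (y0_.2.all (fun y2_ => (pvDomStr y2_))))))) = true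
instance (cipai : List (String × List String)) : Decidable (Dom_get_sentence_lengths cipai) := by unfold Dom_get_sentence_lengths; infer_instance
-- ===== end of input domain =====

-- B replaces A's single counter-carrying loop by a two-pass decomposition (collect boundary
-- indices, then turn consecutive index differences into segment lengths); objective: alternative.


-- ===== PORT A =====
-- A's for-loop over enumerate(cipai["meter"]) with state (sentence_lengths, counter, pian_lengths)
def gslLoopA (n : Int) (meter : List String) (idx : Int)
    (sl : List (List Int)) (counter : Int) (pl : List Int) : List (List Int) :=
  match meter with
  | [] => sl
  | m :: rest =>
    if ¬ (m = "ju" ∨ m = "pian") then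
      gslLoopA n rest (idx + 1) sl (counter + 1) pl
    else if m = "ju" ∧ idx ≠ n - 1 then
      gslLoopA n rest (idx + 1) sl 0 (pl ++ [counter + 1])
    else
      gslLoopA n rest (idx + 1) (sl ++ [pl ++ [counter + 1]]) 0 []

def get_sentence_lengths (cipai : List (String × List String)) : List (List Int) :=
  match (PySem.Dict.mk cipai).get? "meter" with
  | none => []   -- KeyError in Python; excluded by Pre_
  | some meter => gslLoopA (meter.length : Int) meter 0 [] 0 []

-- ===== PORT B =====
-- pass 1: boundary elements (index, m) with m in ("ju","pian")
def gslBounds (meter : List String) (idx : Int) : List (Int × String) :=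
  match meter with
  | [] => []
  | m :: rest =>
    if m = "ju" ∨ m = "pian" then (idx, m) :: gslBounds rest (idx + 1)
    else gslBounds rest (idx + 1)

-- pass 2: consecutive index differences, grouped; flush on "pian" or at the last index
def gslGroup (n : Int) (bs : List (Int × String)) (prev : Int)
    (out : List (List Int)) (group : List Int) : List (List Int) :=
  match bs with
  | [] => out
  | (i, m) :: rest =>
    let group' := group ++ [i - prev]
    if m = "pian" ∨ i = n - 1 then gslGroup n rest i (out ++ [group']) []
    else gslGroup n rest i out group'

def get_sentence_lengths_alt (cipai : List (String × List String)) : List (List Int) :=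
  match (PySem.Dict.mk cipai).get? "meter" with
  | none => []
  | some meter => gslGroup (meter.length : Int) (gslBounds meter 0) (-1) [] []

-- ===== PRECONDITION & SPEC =====
-- Pre_ excludes exactly the inputs where A raises KeyError: no "meter" key.
def Pre_get_sentence_lengths (cipai : List (String × List String)) : Prop :=
  ((PySem.Dict.mk cipai).get? "meter").isSome = true
instance (cipai : List (String × List String)) : Decidable (Pre_get_sentence_lengths cipai) := by unfold Pre_get_sentence_lengths; infer_instance
def pvWitness_get_sentence_lengths : (List (String × List String)) :=
  [("meter", ["ju", "foo", "pian"])]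
def Spec_get_sentence_lengths (cipai : List (String × List String)) (out : List (List Int)) : Prop := out = get_sentence_lengths_alt cipai
instance (cipai : List (String × List String)) (out : List (List Int)) : Decidable (Spec_get_sentence_lengths cipai out) := by unfold Spec_get_sentence_lengths; infer_instance

-- ===== CLAIM (what is proved, stated in full; the proofs are below) =====
def Claim_equal_get_sentence_lengths : Prop := ∀ (cipai : List (String × List String)), Dom_get_sentence_lengths cipai → Pre_get_sentence_lengths cipai → Spec_get_sentence_lengths cipai (get_sentence_lengths cipai)

-- ===== LEMMAS AND PROOFS =====
-- Invariant: with counter = c at index idx, the previous boundary index is idx - c - 1.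
theorem gslLoopA_eq_gslGroup (meter : List String) (n idx c : Int)
    (sl : List (List Int)) (pl : List Int) :
    gslLoopA n meter idx sl c pl
      = gslGroup n (gslBounds meter idx) (idx - c - 1) sl pl := by
  induction meter generalizing idx c sl pl with
  | nil => simp [gslLoopA, gslBounds, gslGroup]
  | cons m rest ih =>
    by_cases hb : m = "ju" ∨ m = "pian"
    · have harith : idx - (idx - c - 1) = c + 1 := by ring
      have hstep : idx + 1 - 0 - 1 = idx := by ring
      by_cases hj : m = "ju" ∧ idx ≠ n - 1
      · have hflush : ¬ (m = "pian" ∨ idx = n - 1) := by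
          rcases hj with ⟨hju, hne⟩
          subst hju
          rintro (h | h)
          · exact absurd h (by decide)
          · exact hne h
        simp only [gslLoopA, if_neg (not_not_intro hb), if_pos hj,
          gslBounds, if_pos hb, gslGroup, if_neg hflush, harith]
        rw [ih, hstep]
      · have hflush : m = "pian" ∨ idx = n - 1 := by
          rcases hb with hju | hp
          · right
            by_contra hne
            exact hj ⟨hju, hne⟩
          · left; exact hp
        simp only [gslLoopA, if_neg (not_not_intro hb), if_neg hj,
          gslBounds, if_pos hb, gslGroup, if_pos hflush, harith]
        rw [ih, hstep]
    · have harith : idx + 1 - (c + 1) - 1 = idx - c - 1 := by ring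
      simp only [gslLoopA, if_pos hb, gslBounds, if_neg hb]
      rw [ih, harith]

-- ===== VERDICT (by name: the statement is the Claim_ definition above) =====
theorem get_sentence_lengths_spec : Claim_equal_get_sentence_lengths := by
  intro cipai _ _
  unfold Spec_get_sentence_lengths get_sentence_lengths get_sentence_lengths_alt
  cases h : (PySem.Dict.mk cipai).get? "meter" with
  | none => rfl
  | some meter =>
    simpa using gslLoopA_eq_gslGroup meter (meter.length : Int) 0 0 [] []
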